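-- pv_equiv track=rewrite | github.com/ispras/lingvodoc | lingvodoc/scripts/docx_import.py | format_match_string
-- ===== SOURCE A (Python) =====
-- def format_match_string(marked_chr_list):
--     """
--     Formats list of marked characters as a string.
--     """
--
--     chr_list = []
--     mark_prev = False
--
--     for chr, mark in marked_chr_list:
--
--         if mark != mark_prev:
--             chr_list.append('(' if mark else ')')
--
--         chr_list.append(chr)
--         mark_prev = mark
--
--     if mark_prev:
--         chr_list.append(')')
--
--     return ''.join(chr_list)
-- ===== SOURCE B (Python) =====
-- from itertools import groupby
--
--
-- def format_match_string(marked_chr_list):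
--     """
--     Formats list of marked characters as a string.
--     """
--
--     return ''.join(
--         '(' + ''.join(c for c, _ in run) + ')' if mark else
--         ''.join(c for c, _ in run)
--         for mark, run in groupby(marked_chr_list, key=lambda cm: cm[1]))
-- ===== Notes on version B (the rewrite author's own statement) =====
-- stated objective: idiomatic
-- what changed: Replaces the per-character state machine (mark_prev flag, transition emission, trailing-paren fixup) with itertools.groupby splitting the input into maximal runs of equal marks, each marked run wrapped in parentheses and all pieces joined.
import Mathlib
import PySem

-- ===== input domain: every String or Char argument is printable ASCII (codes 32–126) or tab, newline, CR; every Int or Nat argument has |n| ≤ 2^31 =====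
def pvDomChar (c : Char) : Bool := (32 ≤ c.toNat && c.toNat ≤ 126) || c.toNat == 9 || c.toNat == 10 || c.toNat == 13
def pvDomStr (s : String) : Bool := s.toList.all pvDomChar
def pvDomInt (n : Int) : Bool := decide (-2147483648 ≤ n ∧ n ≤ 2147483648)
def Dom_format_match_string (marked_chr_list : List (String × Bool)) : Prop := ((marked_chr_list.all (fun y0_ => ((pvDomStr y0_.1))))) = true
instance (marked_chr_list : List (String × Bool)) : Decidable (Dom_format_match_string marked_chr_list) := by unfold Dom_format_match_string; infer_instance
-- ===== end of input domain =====

-- B replaces A's per-character mark_prev state machine by grouping the input into maximal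
-- runs of equal marks and wrapping each marked run in parentheses (more idiomatic, same cost).

-- ===== PORT A =====
-- literal port of A: fold carrying (chr_list, mark_prev), transition emission, trailing ')'
def format_match_string (marked_chr_list : List (String × Bool)) : String :=
  let st := marked_chr_list.foldl
    (fun (st : List String × Bool) cm =>
      let cl := if cm.2 != st.2 then st.1 ++ [if cm.2 then "(" else ")"] else st.1
      (cl ++ [cm.1], cm.2))
    ([], false)
  let chr_list := if st.2 then st.1 ++ [")"] else st.1
  String.join chr_list

-- ===== PORT B =====
-- hand port of itertools.groupby on the mark: maximal runs of equal marks, each as (mark, chars)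
def fmsRuns : List (String × Bool) → List (Bool × List String)
  | [] => []
  | (c, m) :: rest =>
    match fmsRuns rest with
    | (m', cs) :: rs => if m == m' then (m, c :: cs) :: rs else (m, [c]) :: (m', cs) :: rs
    | [] => [(m, [c])]

def format_match_string_alt (marked_chr_list : List (String × Bool)) : String :=
  String.join ((fmsRuns marked_chr_list).map (fun r =>
    if r.1 then "(" ++ String.join r.2 ++ ")" else String.join r.2))

-- ===== PRECONDITION & SPEC =====
def Spec_format_match_string (marked_chr_list : List (String × Bool)) (out : String) : Prop := out = format_match_string_alt marked_chr_list
instance (marked_chr_list : List (String × Bool)) (out : String) : Decidable (Spec_format_match_string marked_chr_list out) := by unfold Spec_format_match_string; infer_instance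

-- ===== CLAIM (what is proved, stated in full; the proofs are below) =====
def Claim_equal_format_match_string : Prop := ∀ (marked_chr_list : List (String × Bool)), Dom_format_match_string marked_chr_list → Spec_format_match_string marked_chr_list (format_match_string marked_chr_list)

-- ===== LEMMAS AND PROOFS =====

-- A's loop, written as a direct recursion carrying only mark_prev (emits the rest of the output)
def fmsEmit (prev : Bool) : List (String × Bool) → String
  | [] => if prev then ")" else ""
  | (c, m) :: t =>
    (if m != prev then (if m then "(" else ")") else "") ++ c ++ fmsEmit m t

def fmsRender (rs : List (Bool × List String)) : String :=
  String.join (rs.map (fun r => if r.1 then "(" ++ String.join r.2 ++ ")" else String.join r.2))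

theorem join_nil : String.join ([] : List String) = "" := rfl

theorem join_cons (a : String) (l : List String) :
    String.join (a :: l) = a ++ String.join l := by
  have h : ∀ (l : List String) (s : String),
      l.foldl (· ++ ·) s = s ++ l.foldl (· ++ ·) "" := by
    intro l
    induction l with
    | nil => intro s; simp [List.foldl, String.append_empty]
    | cons b t ih =>
      intro s
      simp only [List.foldl]
      rw [ih (s ++ b), ih ("" ++ b), String.empty_append, String.append_assoc]
  simp only [String.join, List.foldl]
  rw [h _ ("" ++ a), String.empty_append]

theorem join_append (l₁ l₂ : List String) :
    String.join (l₁ ++ l₂) = String.join l₁ ++ String.join l₂ := by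
  induction l₁ with
  | nil => rw [List.nil_append, join_nil, String.empty_append]
  | cons a t ih =>
    rw [List.cons_append, join_cons, join_cons, ih, String.append_assoc]

theorem render_nil : fmsRender [] = "" := rfl

theorem render_cons (r : Bool × List String) (rs : List (Bool × List String)) :
    fmsRender (r :: rs) =
      (if r.1 then "(" ++ String.join r.2 ++ ")" else String.join r.2) ++ fmsRender rs := by
  simp only [fmsRender, List.map, join_cons]

-- A's fold equals the direct recursion fmsEmit
theorem fold_emit (l : List (String × Bool)) :
    ∀ (acc : List String) (prev : Bool),
    (let st := l.foldl
        (fun (st : List String × Bool) cm =>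
          let cl := if cm.2 != st.2 then st.1 ++ [if cm.2 then "(" else ")"] else st.1
          (cl ++ [cm.1], cm.2)) (acc, prev)
     String.join (if st.2 then st.1 ++ [")"] else st.1))
    = String.join acc ++ fmsEmit prev l := by
  induction l with
  | nil =>
    intro acc prev
    cases prev <;>
      simp [fmsEmit, List.foldl, join_append, join_cons, join_nil, String.append_empty]
  | cons hd t ih =>
    intro acc prev
    obtain ⟨c, m⟩ := hd
    simp only [List.foldl, fmsEmit]
    rw [ih]
    by_cases hm : m = prev
    · subst hm
      simp [join_append, join_cons, join_nil, String.append_empty,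
        String.empty_append, String.append_assoc]
    · have hne : (m != prev) = true := by
        cases m <;> cases prev <;> simp_all
      simp only [hne, ite_true]
      cases m <;>
        simp_all [join_append, join_cons, join_nil, String.append_empty,
          String.append_assoc]

-- the run-grouping characterisation of the state machine
theorem emit_runs (l : List (String × Bool)) :
    fmsEmit false l = fmsRender (fmsRuns l) ∧
    fmsEmit true l =
      (match fmsRuns l with
       | (true, cs) :: rs => String.join cs ++ (")" ++ fmsRender rs)
       | rs => ")" ++ fmsRender rs) := by
  induction l with
  | nil =>
    refine ⟨rfl, ?_⟩
    simp [fmsRuns, render_nil, fmsEmit, String.append_empty]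
  | cons hd t ih =>
    obtain ⟨c, m⟩ := hd
    obtain ⟨ih1, ih2⟩ := ih
    cases m
    · -- m = false
      have h1 : fmsEmit false ((c, false) :: t) = c ++ fmsEmit false t := by
        simp [fmsEmit, String.empty_append]
      have hr : fmsRender (fmsRuns ((c, false) :: t)) = c ++ fmsRender (fmsRuns t) := by
        simp only [fmsRuns]
        cases hrt : fmsRuns t with
        | nil => simp [render_cons, render_nil, join_cons, join_nil, String.append_empty]
        | cons r rs =>
          obtain ⟨m', cs⟩ := r
          cases m' <;>
            simp [render_cons, join_cons, join_nil, String.append_assoc]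
      constructor
      · rw [h1, ih1, hr]
      · have h2 : fmsEmit true ((c, false) :: t) = ")" ++ (c ++ fmsEmit false t) := by
          simp [fmsEmit, String.append_assoc]
        rw [h2, ih1, ← hr]
        -- head of fmsRuns ((c,false)::t) has mark false in every case
        simp only [fmsRuns]
        cases hrt : fmsRuns t with
        | nil => simp
        | cons r rs =>
          obtain ⟨m', cs⟩ := r
          cases m' <;> simp
    · -- m = true
      have h2 : fmsEmit true ((c, true) :: t) = c ++ fmsEmit true t := by
        simp [fmsEmit, String.empty_append]
      have key : fmsEmit true ((c, true) :: t) =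
          (match fmsRuns ((c, true) :: t) with
           | (true, cs) :: rs => String.join cs ++ (")" ++ fmsRender rs)
           | rs => ")" ++ fmsRender rs) := by
        rw [h2, ih2]
        simp only [fmsRuns]
        cases hrt : fmsRuns t with
        | nil => simp [join_cons, join_nil, String.append_empty]
        | cons r rs =>
          obtain ⟨m', cs⟩ := r
          cases m' <;>
            simp [join_cons, join_nil, String.append_empty, String.append_assoc]
      refine ⟨?_, key⟩
      have h1 : fmsEmit false ((c, true) :: t) = "(" ++ fmsEmit true ((c, true) :: t) := by
        simp [fmsEmit, String.append_assoc]
      rw [h1, key]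
      -- head of fmsRuns ((c,true)::t) has mark true in every case
      simp only [fmsRuns]
      cases hrt : fmsRuns t with
      | nil =>
        simp [render_cons, render_nil, join_cons, join_nil, String.append_empty,
          String.append_assoc]
      | cons r rs =>
        obtain ⟨m', cs⟩ := r
        cases m' <;>
          simp [render_cons, join_cons, String.append_assoc]

-- ===== VERDICT (by name: the statement is the Claim_ definition above) =====
theorem format_match_string_spec : Claim_equal_format_match_string := by
  intro l _
  show format_match_string l = format_match_string_alt l
  have h := fold_emit l [] false
  simp only [format_match_string]
  rw [h, (emit_runs l).1]
  simp only [join_nil, String.empty_append, format_match_string_alt, fmsRender]
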